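-- pv_equiv track=rewrite | github.com/MCPost/PixelTrigger_Functions | triggervalue2gb.py | triggervalue2gb
-- ===== SOURCE A (Python) =====
-- def triggervalue2gb(triggervalue):
--
--     trigger_bin = list(bin(triggervalue))
--     trigger_bin = trigger_bin[2:]
--     trigger_bin = list('0'*max(0, 8-len(trigger_bin))) + trigger_bin
--
--     all_comb = [bin(i) for i in range(256)]
--
--     temp_green = list('00000000')
--     #temp_green[0::2] = trigger_bin[0:4]
--     temp_green[4:8] = trigger_bin[4:8]
--     temp_blue = list('00000000')
--     #temp_blue[0::2] = trigger_bin[4:8]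
--     temp_blue[4:8] = trigger_bin[0:4]
--
--     GB = [[] for _ in range(len(all_comb))]
--     for j,y in enumerate(all_comb):
--         temp_comb2 = list(y)
--         temp_comb2 = temp_comb2[2:]
--         temp_comb2 = list('0'*max(0, 8-len(temp_comb2))) + temp_comb2
--         #temp_green[1::2] = temp_comb2[0:4]
--         temp_green[0:4] = temp_comb2[0:4]
--         #temp_blue[1::2] = temp_comb2[4:8]
--         temp_blue[0:4] = temp_comb2[4:8]
--         GB[j] = (int("0b" + "".join(temp_green),2), int("0b" + "".join(temp_blue),2))
--
--     return(GB)
-- ===== SOURCE B (Python) =====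
-- def triggervalue2gb(triggervalue):
--     # derive the padded binary string exactly as A does, once
--     s = bin(triggervalue)[2:]
--     s = '0' * max(0, 8 - len(s)) + s
--     tlow = int(s[4:8], 2)
--     thigh = int(s[0:4], 2)
--     out = []
--     for jh in range(16):
--         for jl in range(16):
--             out.append((jh * 16 + tlow, jl * 16 + thigh))
--     return out
-- ===== Notes on version B (the rewrite author's own statement) =====
-- stated objective: alternative
-- what changed: B extracts the trigger's two nibble values once from the padded binary string and enumerates every green/blue output with a nested pair of nibble loops doing pure arithmetic, instead of A's single loop that re-builds, pads and re-parses a binary string for each combination via list-slice assignments.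
import Mathlib
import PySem

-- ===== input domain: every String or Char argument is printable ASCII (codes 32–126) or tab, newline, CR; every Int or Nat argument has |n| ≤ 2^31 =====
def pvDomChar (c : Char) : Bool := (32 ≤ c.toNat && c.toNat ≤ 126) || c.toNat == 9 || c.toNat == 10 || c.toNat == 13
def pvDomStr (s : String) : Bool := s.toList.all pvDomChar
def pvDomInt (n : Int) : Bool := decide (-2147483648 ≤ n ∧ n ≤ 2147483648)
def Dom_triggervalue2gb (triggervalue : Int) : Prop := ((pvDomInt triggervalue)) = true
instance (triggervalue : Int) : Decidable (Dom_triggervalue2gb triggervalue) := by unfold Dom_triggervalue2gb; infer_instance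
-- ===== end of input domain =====

-- B replaces A's per-element binary-string rebuild/parse loop by one nibble extraction plus a nested 16x16 arithmetic loop (alternative decomposition, same result).

-- ===== PORT A =====
-- binary digits of n (msb first), structural fuel recursion; exact rendering of bin(n)[2:] for n ≥ 0
def pvBits : Nat → Nat → List Char
  | 0, _ => []
  | fuel+1, n => if n = 0 then [] else pvBits fuel (n / 2) ++ [if n % 2 = 1 then '1' else '0']

-- bin(n) as a char list ('0b' prefix kept, sliced off by the callers exactly as the Python does);
-- exact for n ≥ 0 (Python's '-0b…' for negatives is excluded by Pre_, where A raises ValueError)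
def pvPyBin (n : Int) : List Char :=
  if n ≤ 0 then ['0', 'b', '0'] else '0' :: 'b' :: pvBits n.toNat n.toNat

-- list('0'*max(0, 8-len(l))) + l  (Nat subtraction clamps exactly like Python's max(0, ·))
def pvPad8 (l : List Char) : List Char := List.replicate (max 0 (8 - l.length)) '0' ++ l

-- int("0b" + "".join(cs), 2): exact for cs made of '0'/'1' digits, which is all that occurs for tv ≥ 0
def pvParseBin (cs : List Char) : Int := cs.foldl (fun a c => 2 * a + (if c = '1' then 1 else 0)) 0

-- one iteration of A's loop: state = (temp_green, temp_blue, GB); slice assignment l[0:4]=X is X ++ l.drop 4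
def pvStepA (st : List Char × List Char × List (Int × Int)) (y : List Char) :
    List Char × List Char × List (Int × Int) :=
  let temp_comb2 := pvPad8 (PySem.List.slice y (some 2) none)
  let tg := PySem.List.slice temp_comb2 (some 0) (some 4) ++ st.1.drop 4
  let tb := PySem.List.slice temp_comb2 (some 4) (some 8) ++ st.2.1.drop 4
  (tg, tb, st.2.2 ++ [(pvParseBin tg, pvParseBin tb)])

def triggervalue2gb (triggervalue : Int) : List (Int × Int) :=
  let trigger_bin := pvPad8 (PySem.List.slice (pvPyBin triggervalue) (some 2) none)
  let all_comb := (List.range 256).map (fun i : Nat => pvPyBin (i : Int))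
  -- temp_green = list('00000000'); temp_green[4:8] = trigger_bin[4:8]
  let temp_green := (['0','0','0','0','0','0','0','0'] : List Char).take 4 ++
      PySem.List.slice trigger_bin (some 4) (some 8) ++
      (['0','0','0','0','0','0','0','0'] : List Char).drop 8
  -- temp_blue = list('00000000'); temp_blue[4:8] = trigger_bin[0:4]
  let temp_blue := (['0','0','0','0','0','0','0','0'] : List Char).take 4 ++
      PySem.List.slice trigger_bin (some 0) (some 4) ++
      (['0','0','0','0','0','0','0','0'] : List Char).drop 8
  -- GB[j] is assigned for j = 0,1,…,255 in order: building by appending is that same list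
  (all_comb.foldl pvStepA (temp_green, temp_blue, [])).2.2

-- ===== PORT B =====
def triggervalue2gb_alt (triggervalue : Int) : List (Int × Int) :=
  let s := pvPad8 (PySem.List.slice (pvPyBin triggervalue) (some 2) none)
  let tlow := pvParseBin (PySem.List.slice s (some 4) (some 8))
  let thigh := pvParseBin (PySem.List.slice s (some 0) (some 4))
  (List.range 16).flatMap (fun jh =>
    (List.range 16).map (fun jl => (((jh : Nat) : Int) * 16 + tlow, ((jl : Nat) : Int) * 16 + thigh)))

-- ===== PRECONDITION & SPEC =====
-- A (and B) raise ValueError on negative trigger values: bin() yields '-0b…' whose sliced digits fail int(·,2)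
def Pre_triggervalue2gb (triggervalue : Int) : Prop := 0 ≤ triggervalue
instance (triggervalue : Int) : Decidable (Pre_triggervalue2gb triggervalue) := by
  unfold Pre_triggervalue2gb; infer_instance

def pvWitness_triggervalue2gb : Int := (5)

def Spec_triggervalue2gb (triggervalue : Int) (out : List (Int × Int)) : Prop := out = triggervalue2gb_alt triggervalue
instance (triggervalue : Int) (out : List (Int × Int)) : Decidable (Spec_triggervalue2gb triggervalue out) := by unfold Spec_triggervalue2gb; infer_instance

-- ===== CLAIM (what is proved, stated in full; the proofs are below) =====
def Claim_equal_triggervalue2gb : Prop := ∀ (triggervalue : Int), Dom_triggervalue2gb triggervalue → Pre_triggervalue2gb triggervalue → Spec_triggervalue2gb triggervalue (triggervalue2gb triggervalue)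

-- ===== LEMMAS AND PROOFS =====

theorem pvPad8_length (l : List Char) : 8 ≤ (pvPad8 l).length := by
  simp [pvPad8]; omega

theorem pvParseBin_from (y : List Char) (a : Int) :
    y.foldl (fun a c => 2 * a + (if c = '1' then 1 else 0)) a
      = a * 2 ^ y.length + pvParseBin y := by
  induction y generalizing a with
  | nil => simp [pvParseBin]
  | cons c y ih =>
    simp only [List.foldl_cons, pvParseBin, List.length_cons] at *
    rw [ih, ih (2 * 0 + _)]
    ring

theorem pvParseBin_append (x y : List Char) :
    pvParseBin (x ++ y) = pvParseBin x * 2 ^ y.length + pvParseBin y := by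
  simp only [pvParseBin, List.foldl_append]
  exact pvParseBin_from y _

theorem pv_slice04 (l : List Char) :
    PySem.List.slice l (some 0) (some 4) = l.take 4 := by
  rw [PySem.List.slice_toNat l (by norm_num) (by norm_num)]; simp

theorem pv_slice48 (l : List Char) :
    PySem.List.slice l (some 4) (some 8) = (l.drop 4).take 4 := by
  rw [PySem.List.slice_toNat l (by norm_num) (by norm_num)]; simp

-- the loop invariant for A: the accumulated GB, with the constant tails tg.drop 4 / tb.drop 4
theorem pv_loopA (ys : List (List Char)) (tg tb : List Char) (acc : List (Int × Int)) :
    (ys.foldl pvStepA (tg, tb, acc)).2.2 =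
      acc ++ ys.map (fun y =>
        let comb := pvPad8 (PySem.List.slice y (some 2) none)
        (pvParseBin (comb.take 4 ++ tg.drop 4),
         pvParseBin ((comb.drop 4).take 4 ++ tb.drop 4))) := by
  induction ys generalizing tg tb acc with
  | nil => simp
  | cons y ys ih =>
    simp only [List.foldl_cons, List.map_cons]
    rw [pvStepA]
    simp only [pv_slice04, pv_slice48]
    rw [ih]
    have h8 := pvPad8_length (PySem.List.slice y (some 2) none)
    have hg : ((pvPad8 (PySem.List.slice y (some 2) none)).take 4 ++ tg.drop 4).drop 4
        = tg.drop 4 := by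
      rw [List.drop_append_of_le_length (by simp; omega)]
      simp
    have hb : (((pvPad8 (PySem.List.slice y (some 2) none)).drop 4).take 4 ++ tb.drop 4).drop 4
        = tb.drop 4 := by
      rw [List.drop_append_of_le_length (by simp; omega)]
      simp
    simp [hg, hb]

-- the per-combination nibble values, checked for all 256 combinations
set_option maxRecDepth 100000 in
theorem pv_nibbles : ∀ j : Nat, j < 256 →
    pvParseBin ((pvPad8 (PySem.List.slice (pvPyBin (j : Int)) (some 2) none)).take 4) = ((j / 16 : Nat) : Int)
    ∧ pvParseBin (((pvPad8 (PySem.List.slice (pvPyBin (j : Int)) (some 2) none)).drop 4).take 4) = ((j % 16 : Nat) : Int) := by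
  decide

set_option maxRecDepth 100000 in
theorem pv_range256 :
    List.range 256 = (List.range 16).flatMap (fun jh => (List.range 16).map (fun jl => 16 * jh + jl)) := by
  decide

theorem pv_flatMap_congr {a b : Type} (l : List a) (f g : a → List b)
    (h : ∀ x ∈ l, f x = g x) : l.flatMap f = l.flatMap g :=
  List.flatMap_congr h

theorem pv_final (tl th : Int) :
    (List.range 256).map (fun j : Nat => (((j / 16 : Nat) : Int) * 16 + tl, ((j % 16 : Nat) : Int) * 16 + th))
      = (List.range 16).flatMap (fun jh =>
          (List.range 16).map (fun jl => (((jh : Nat) : Int) * 16 + tl, ((jl : Nat) : Int) * 16 + th))) := by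
  rw [pv_range256, List.map_flatMap]
  apply pv_flatMap_congr
  intro jh hjh
  rw [List.map_map]
  apply List.map_congr_left
  intro jl hjl
  simp only [List.mem_range] at hjh hjl
  have h1 : (16 * jh + jl) / 16 = jh := by omega
  have h2 : (16 * jh + jl) % 16 = jl := by omega
  simp only [Function.comp_apply, h1, h2]

theorem triggervalue2gb_spec' (tv : Int) :
    triggervalue2gb tv = triggervalue2gb_alt tv := by
  unfold triggervalue2gb triggervalue2gb_alt
  set S := pvPad8 (PySem.List.slice (pvPyBin tv) (some 2) none) with hS
  have h8 : 8 ≤ S.length := pvPad8_length _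
  rw [pv_loopA]
  simp only [List.nil_append, List.map_map]
  have hgt : ((['0','0','0','0','0','0','0','0'] : List Char).take 4 ++
      PySem.List.slice S (some 4) (some 8) ++
      (['0','0','0','0','0','0','0','0'] : List Char).drop 8).drop 4
      = PySem.List.slice S (some 4) (some 8) := by
    simp
  have hbt : ((['0','0','0','0','0','0','0','0'] : List Char).take 4 ++
      PySem.List.slice S (some 0) (some 4) ++
      (['0','0','0','0','0','0','0','0'] : List Char).drop 8).drop 4
      = PySem.List.slice S (some 0) (some 4) := by
    simp
  rw [hgt, hbt]
  have hlg : (PySem.List.slice S (some 4) (some 8)).length = 4 := by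
    rw [pv_slice48]; simp; omega
  have hlb : (PySem.List.slice S (some 0) (some 4)).length = 4 := by
    rw [pv_slice04]; simp; omega
  rw [← pv_final (pvParseBin (PySem.List.slice S (some 4) (some 8)))
        (pvParseBin (PySem.List.slice S (some 0) (some 4)))]
  apply List.map_congr_left
  intro j hj
  simp only [List.mem_range] at hj
  have h := pv_nibbles j hj
  simp only [Function.comp_apply, pvParseBin_append, hlg, hlb, h.1, h.2]
  norm_num

-- ===== VERDICT (by name: the statement is the Claim_ definition above) =====
theorem triggervalue2gb_spec : Claim_equal_triggervalue2gb := by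
  intro tv _ _
  exact triggervalue2gb_spec' tv
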